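-- pv_equiv track=rewrite | github.com/RasmusLesebergPXL/PBTIN | Jaar_1/IT_Essentials/IT-essentials-oefeningen/7_lists/abracadabra letters vervangen in string - Copy.py | verander
-- ===== SOURCE A (Python) =====
-- def verander(tekst, aantal):
--     resultaat = tekst[0]
--     eerste_letter = tekst[0].lower()
--     index = 1
--     aantal_vervangen = 0
--     while index < len(tekst):
--         if tekst[index].lower() == eerste_letter and aantal_vervangen < aantal:
--             resultaat += '$'
--             aantal_vervangen += 1
--         else:
--             resultaat += tekst[index]
--         index += 1
--     return resultaat
-- ===== SOURCE B (Python) =====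
-- def verander(tekst, aantal):
--     eerste_letter = tekst[0].lower()
--     matches = [i for i, c in enumerate(tekst) if i >= 1 and c.lower() == eerste_letter]
--     chosen = set(matches[:max(0, aantal)])
--     return ''.join('$' if i in chosen else c for i, c in enumerate(tekst))
-- ===== Notes on version B (the rewrite author's own statement) =====
-- stated objective: faster
-- what changed: Replaces A's single stateful counter loop (repeated string concatenation while counting replacements) with a two-phase decomposition: one pass collecting the indices of case-insensitive matches of the first letter, a slice keeping the first max(0, aantal) of them as a set, and a second enumerate pass rebuilding the string via join by set membership.
import Mathlib
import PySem

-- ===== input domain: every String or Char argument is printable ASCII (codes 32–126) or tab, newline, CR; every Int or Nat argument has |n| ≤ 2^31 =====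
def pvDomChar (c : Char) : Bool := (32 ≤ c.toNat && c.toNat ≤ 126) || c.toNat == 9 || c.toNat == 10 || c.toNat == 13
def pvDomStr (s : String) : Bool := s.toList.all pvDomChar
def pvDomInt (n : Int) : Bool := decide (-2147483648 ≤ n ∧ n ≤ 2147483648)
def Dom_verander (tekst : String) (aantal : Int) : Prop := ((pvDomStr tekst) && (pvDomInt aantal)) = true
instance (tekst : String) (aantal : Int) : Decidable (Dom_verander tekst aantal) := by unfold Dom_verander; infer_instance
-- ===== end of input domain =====

-- B replaces A's stateful counter loop by a two-phase decomposition (collect match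
-- indices, keep the first max(0, aantal) as a set, rebuild by membership); same values.

-- ===== PORT A =====
def verander (tekst : String) (aantal : Int) : String :=
  match PySem.List.pyGet? tekst.toList 0 with
  | none => ""   -- tekst[0] raises IndexError on the empty string; excluded by Pre_verander
  | some c0 =>
    let eerste := PySem.Chars.lowerChar c0
    let st := (PySem.List.pyRange 1 (PySem.List.len tekst.toList) 1).foldl
      (fun (st : List Char × Int) i =>
        let c := PySem.List.pyGetD tekst.toList i ' '
        if (PySem.Chars.lowerChar c == eerste) && decide (st.2 < aantal) then
          (st.1 ++ ['$'], st.2 + 1)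
        else
          (st.1 ++ [c], st.2)) ([c0], 0)
    String.ofList st.1

-- ===== PORT B =====
def verander_alt (tekst : String) (aantal : Int) : String :=
  match PySem.List.pyGet? tekst.toList 0 with
  | none => ""   -- tekst[0] raises IndexError on the empty string; excluded by Pre_verander
  | some c0 =>
    let eerste := PySem.Chars.lowerChar c0
    let matchIdx := ((PySem.List.enumerate tekst.toList).filter
        (fun ic => decide (1 ≤ ic.1) && (PySem.Chars.lowerChar ic.2 == eerste))).map (fun ic => ic.1)
    let chosen : PySem.Set Int :=
      PySem.Set.ofList (PySem.List.slice matchIdx none (some (max 0 aantal)))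
    String.ofList ((PySem.List.enumerate tekst.toList).map
      (fun ic => if PySem.Set.contains chosen ic.1 then '$' else ic.2))

-- ===== PRECONDITION & SPEC =====
-- Pre_ excludes only the empty string, on which A (and B) raise IndexError at tekst[0].
def Pre_verander (tekst : String) (aantal : Int) : Prop := tekst.toList ≠ []
instance (tekst : String) (aantal : Int) : Decidable (Pre_verander tekst aantal) := by unfold Pre_verander; infer_instance
def pvWitness_verander : String × Int := ("Abracadabra", 3)

def Spec_verander (tekst : String) (aantal : Int) (out : String) : Prop := out = verander_alt tekst aantal
instance (tekst : String) (aantal : Int) (out : String) : Decidable (Spec_verander tekst aantal out) := by unfold Spec_verander; infer_instance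

-- ===== CLAIM (what is proved, stated in full; the proofs are below) =====
def Claim_equal_verander : Prop := ∀ (tekst : String) (aantal : Int), Dom_verander tekst aantal → Pre_verander tekst aantal → Spec_verander tekst aantal (verander tekst aantal)

-- ===== LEMMAS AND PROOFS =====

-- the common intermediate form: replace a matching char by '$' while the counter is below aantal
def pvRec (e : Char) (aantal : Int) : List Char → Int → List Char
  | [], _ => []
  | c :: l, cnt =>
    if (PySem.Chars.lowerChar c == e) && decide (cnt < aantal) then
      '$' :: pvRec e aantal l (cnt + 1)
    else
      c :: pvRec e aantal l cnt

-- indices (from s on) of the chars matching e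
def pvM (e : Char) : List Char → Int → List Int
  | [], _ => []
  | c :: l, s =>
    if PySem.Chars.lowerChar c == e then s :: pvM e l (s + 1) else pvM e l (s + 1)

theorem pvM_lower_bound (e : Char) (l : List Char) (s x : Int) (hx : x ∈ pvM e l s) : s ≤ x := by
  induction l generalizing s with
  | nil => simp [pvM] at hx
  | cons c l ih =>
    simp only [pvM] at hx
    split at hx
    · rcases List.mem_cons.mp hx with h | h
      · omega
      · have := ih (s + 1) h; omega
    · have := ih (s + 1) hx; omega

theorem pvA_loop (e : Char) (aantal : Int) (l : List Char) (acc : List Char) (cnt : Int) :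
    (l.foldl (fun (st : List Char × Int) (c : Char) =>
        if (PySem.Chars.lowerChar c == e) && decide (st.2 < aantal) then
          (st.1 ++ ['$'], st.2 + 1)
        else
          (st.1 ++ [c], st.2)) (acc, cnt)).1 = acc ++ pvRec e aantal l cnt := by
  induction l generalizing acc cnt with
  | nil => simp [pvRec]
  | cons c l ih =>
    rw [List.foldl_cons]
    by_cases h : ((PySem.Chars.lowerChar c == e) && decide (cnt < aantal)) = true
    · rw [if_pos h, ih, pvRec, if_pos h]
      simp
    · rw [if_neg h, ih, pvRec, if_neg h]
      simp

theorem pvB_matchIdx (e : Char) (l : List Char) (s : Int) (hs : 1 ≤ s) :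
    ((PySem.List.enumerate l s).filter
        (fun ic => decide (1 ≤ ic.1) && (PySem.Chars.lowerChar ic.2 == e))).map (fun ic => ic.1)
      = pvM e l s := by
  induction l generalizing s with
  | nil => simp [PySem.List.enumerate_nil, pvM]
  | cons c l ih =>
    rw [PySem.List.enumerate_cons]
    by_cases h : (PySem.Chars.lowerChar c == e) = true
    · simp [pvM, h, hs, ih (s + 1) (by omega)]
    · simp [pvM, h, hs, ih (s + 1) (by omega)]

theorem pvB_render (e : Char) (aantal : Int) (l : List Char) (s cnt : Int) (hs : 1 ≤ s) :
    (PySem.List.enumerate l s).map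
        (fun ic => if (List.take (aantal - cnt).toNat (pvM e l s)).contains ic.1 then '$' else ic.2)
      = pvRec e aantal l cnt := by
  induction l generalizing s cnt with
  | nil => simp [PySem.List.enumerate_nil, pvRec]
  | cons c l ih =>
    rw [PySem.List.enumerate_cons]
    by_cases h : (PySem.Chars.lowerChar c == e) = true
    · by_cases hcnt : cnt < aantal
      · have hk : (aantal - cnt).toNat = (aantal - (cnt + 1)).toNat + 1 := by omega
        simp only [pvM, pvRec, h, if_true, hk, List.take_succ_cons, List.map_cons]
        rw [if_pos (show ((true : Bool) && decide (cnt < aantal)) = true by simp [hcnt])]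
        refine List.cons_eq_cons.mpr ⟨by simp, ?_⟩
        rw [← ih (s + 1) (cnt + 1) (by omega)]
        apply List.map_congr_left
        intro ic hic
        obtain ⟨k, hk', rfl⟩ := (PySem.List.mem_enumerate_iff _ _ _).mp hic
        have hne : ¬ (s + 1 + (k : Int) = s) := by omega
        simp [hne]
      · have hk : (aantal - cnt).toNat = 0 := by omega
        simp only [pvM, pvRec, h, if_true, hk, List.take_zero, List.map_cons]
        rw [if_neg (show ¬ ((true : Bool) && decide (cnt < aantal)) = true by simp [hcnt])]
        refine List.cons_eq_cons.mpr ⟨by simp, ?_⟩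
        have htail := ih (s + 1) cnt (by omega)
        simp only [hk, List.take_zero] at htail
        exact htail
    · rw [Bool.not_eq_true] at h
      simp only [pvM, pvRec, h, Bool.false_eq_true, if_false, Bool.false_and, List.map_cons]
      refine List.cons_eq_cons.mpr ⟨?_, ih (s + 1) cnt (by omega)⟩
      have hno : (List.take (aantal - cnt).toNat (pvM e l (s + 1))).contains s = false := by
        rw [Bool.eq_false_iff]
        intro hmem
        have hm : s ∈ pvM e l (s + 1) :=
          List.mem_of_mem_take (List.contains_iff_mem.mp hmem)
        have := pvM_lower_bound e l (s + 1) s hm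
        omega
      rw [hno]
      simp

theorem pvSet_contains_ofList (xs : List Int) (a : Int) :
    PySem.Set.contains (PySem.Set.ofList xs) a = xs.contains a := by
  by_cases h : a ∈ xs
  · simp [h, (PySem.Set.mem_ofList _ _).mpr h]
  · simp [h]

-- ===== VERDICT (by name: the statement is the Claim_ definition above) =====
theorem verander_spec : Claim_equal_verander := by
  intro tekst aantal _hdom hpre
  unfold Spec_verander verander verander_alt
  obtain ⟨c0, rest, hcs⟩ : ∃ c0 rest, tekst.toList = c0 :: rest := by
    cases h : tekst.toList with
    | nil => exact absurd h hpre
    | cons a b => exact ⟨a, b, rfl⟩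
  rw [hcs]
  rw [PySem.List.pyGet?_zero_cons]
  simp only []
  -- A side
  have hA := PySem.List.foldl_pyRange_pyGetD (xs := c0 :: rest) (a := 1) (d := ' ')
      (f := fun (st : List Char × Int) (c : Char) =>
        if (PySem.Chars.lowerChar c == PySem.Chars.lowerChar c0) && decide (st.2 < aantal) then
          (st.1 ++ ['$'], st.2 + 1)
        else
          (st.1 ++ [c], st.2))
      (init := ([c0], 0)) (by omega)
  rw [hA]
  simp only [Int.toNat_one, List.drop_succ_cons, List.drop_zero]
  rw [pvA_loop]
  -- B side
  rw [PySem.List.enumerate_cons]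
  rw [List.filter_cons]
  simp only [show (decide ((1:Int) ≤ 0)) = false by decide, Bool.false_and, Bool.false_eq_true,
    if_false, zero_add]
  rw [pvB_matchIdx (PySem.Chars.lowerChar c0) rest 1 (by omega)]
  rw [PySem.List.slice_to _ (le_max_left 0 aantal)]
  have hmax : (max 0 aantal).toNat = (aantal - 0).toNat := by omega
  rw [hmax]
  rw [List.map_cons]
  rw [show (fun (ic : Int × Char) => if PySem.Set.contains (PySem.Set.ofList (List.take (aantal - 0).toNat (pvM (PySem.Chars.lowerChar c0) rest 1))) ic.1 then '$' else ic.2)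
        = (fun (ic : Int × Char) => if (List.take (aantal - 0).toNat (pvM (PySem.Chars.lowerChar c0) rest 1)).contains ic.1 then '$' else ic.2) from
      funext fun ic => by rw [pvSet_contains_ofList]]
  rw [pvB_render (PySem.Chars.lowerChar c0) aantal rest 1 0 (by omega)]
  have h0 : (0:Int) ∉ List.take aantal.toNat (pvM (PySem.Chars.lowerChar c0) rest 1) := fun hm =>
    absurd (pvM_lower_bound _ rest 1 0 (List.mem_of_mem_take hm)) (by omega)
  simp [h0]
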